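-- pv_equiv track=rewrite | github.com/btrotta/advent-of-code-2021 | day_10b.py | complete_row
-- ===== SOURCE A (Python) =====
-- def match(a, b):
--     return ([a, b] == ["(", ")"]) or ([a, b] == ["[", "]"]) or ([a, b] == ["{", "}"]) or ([a, b] == ["<", ">"])
--
-- def complete_row(a):
--     stack = []
--     for ch in a:
--         if ch in ['(', '[', '{', '<']:
--             stack.append(ch)
--         else:
--             ch2 = stack.pop()
--             if not(match(ch2, ch)):
--                 return -1
--     score = 0
--     for ch in reversed(stack):
--         score *= 5
--         score += {'(': 1, '[': 2, '{': 3, '<': 4}[ch]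
--     return score
-- ===== SOURCE B (Python) =====
-- def complete_row(a):
--     # single pass: fuse validation and completion scoring; each open bracket's
--     # positional contribution value*5**depth is kept on the stack so a pop undoes it
--     stack = []
--     score = 0
--     for ch in a:
--         if ch in '([{<':
--             w = {'(': 1, '[': 2, '{': 3, '<': 4}[ch] * 5 ** len(stack)
--             stack.append((ch, w))
--             score += w
--         else:
--             ch2, w = stack.pop()
--             if ch2 + ch not in ('()', '[]', '{}', '<>'):
--                 return -1
--             score -= w
--     return score
-- ===== Notes on version B (the rewrite author's own statement) =====
-- stated objective: alternative
-- what changed: B fuses A's second scoring pass over the leftover stack into the single validation loop: each open bracket's positional contribution value*5**depth is computed at push time, added to a running score and kept on the stack so a pop subtracts it back out.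
import Mathlib
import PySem

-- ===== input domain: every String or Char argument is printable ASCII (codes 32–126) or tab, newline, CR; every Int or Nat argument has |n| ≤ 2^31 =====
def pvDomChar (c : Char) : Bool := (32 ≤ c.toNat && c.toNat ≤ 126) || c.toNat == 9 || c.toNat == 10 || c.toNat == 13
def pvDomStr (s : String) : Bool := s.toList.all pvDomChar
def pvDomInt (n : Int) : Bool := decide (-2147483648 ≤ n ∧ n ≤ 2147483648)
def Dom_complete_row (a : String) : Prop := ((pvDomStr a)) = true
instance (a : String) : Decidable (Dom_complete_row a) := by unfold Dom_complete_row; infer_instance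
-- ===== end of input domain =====

-- B fuses A's second scoring pass into the validation loop (objective: alternative single-pass decomposition, same cost).

-- ===== PORT A =====
def pvMatch (a b : Char) : Bool :=
  (a = '(' && b = ')') || (a = '[' && b = ']') || (a = '{' && b = '}') || (a = '<' && b = '>')

def pvIsOpen (c : Char) : Bool := c = '(' || c = '[' || c = '{' || c = '<'

def pvVal (c : Char) : Int :=
  if c = '(' then 1 else if c = '[' then 2 else if c = '{' then 3 else if c = '<' then 4 else 0

-- second pass of A: score over reversed(stack); stack is kept top-first, so reversed(stack) is the list itself
def pvScore (stack : List Char) (score : Int) : Int :=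
  stack.foldl (fun s c => s * 5 + pvVal c) score

def complete_row_go : List Char → List Char → Int
  | [], stack => pvScore stack 0
  | c :: rest, stack =>
    if pvIsOpen c then complete_row_go rest (c :: stack)
    else
      match stack with
      | [] => -1  -- Python raises IndexError here (stack.pop() on []); outside Pre_, totalizing guard
      | t :: s => if pvMatch t c then complete_row_go rest s else -1

def complete_row (a : String) : Int := complete_row_go a.toList []

-- ===== PORT B =====
-- stack of (open bracket, its positional contribution value*5^depth); running score
def complete_row_alt_go : List Char → List (Char × Int) → Int → Int
  | [], _, score => score
  | c :: rest, stack, score =>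
    if pvIsOpen c then
      let w := pvVal c * 5 ^ stack.length
      complete_row_alt_go rest ((c, w) :: stack) (score + w)
    else
      match stack with
      | [] => -1  -- Python raises IndexError here; outside Pre_, totalizing guard
      | (t, w) :: s => if pvMatch t c then complete_row_alt_go rest s (score - w) else -1

def complete_row_alt (a : String) : Int := complete_row_alt_go a.toList [] 0

-- ===== PRECONDITION & SPEC =====
-- Pre_ excludes exactly the strings on which Python A raises IndexError (a pop from an empty
-- stack reached before any mismatch), characterised positionally by prefix bracket counts:
-- pvBal l k = stack depth before position k while no pop has failed; an empty pop happens at the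
-- first non-open position i of depth 0 provided every earlier pop (non-open k) found its matching
-- open, namely the rightmost earlier open j of depth pvBal l k - 1.
def pvBal (l : List Char) (k : Nat) : Int :=
  2 * (((l.take k).filter pvIsOpen).length : Int) - k

def pvRaiseAt (l : List Char) (i : Nat) : Bool :=
  !pvIsOpen (l.getD i ' ') && pvBal l i == 0 &&
  (List.range i).all (fun k => pvIsOpen (l.getD k ' ') || decide (0 < pvBal l k)) &&
  (List.range i).all (fun k => pvIsOpen (l.getD k ' ') ||
    (List.range k).any (fun j => pvIsOpen (l.getD j ' ') && pvBal l j == pvBal l k - 1 &&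
      (List.range k).all (fun j' => !decide (j < j') || !pvIsOpen (l.getD j' ' ') ||
        !(pvBal l j' == pvBal l k - 1)) &&
      pvMatch (l.getD j ' ') (l.getD k ' ')))

def Pre_complete_row (a : String) : Prop :=
  ((List.range a.toList.length).all (fun i => !pvRaiseAt a.toList i)) = true
instance (a : String) : Decidable (Pre_complete_row a) := by unfold Pre_complete_row; infer_instance
def pvWitness_complete_row : String := "([{}]<>)"

def Spec_complete_row (a : String) (out : Int) : Prop := out = complete_row_alt a
instance (a : String) (out : Int) : Decidable (Spec_complete_row a out) := by unfold Spec_complete_row; infer_instance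

-- ===== CLAIM (what is proved, stated in full; the proofs are below) =====
def Claim_equal_complete_row : Prop := ∀ (a : String), Dom_complete_row a → Pre_complete_row a → Spec_complete_row a (complete_row a)

-- ===== LEMMAS AND PROOFS =====

-- tagging a plain stack with the contributions B keeps alongside it
def pvTag : List Char → List (Char × Int)
  | [] => []
  | c :: s => (c, pvVal c * 5 ^ s.length) :: pvTag s

theorem pvTag_length (s : List Char) : (pvTag s).length = s.length := by
  induction s with
  | nil => rfl
  | cons c s ih => simp [pvTag, ih]

theorem pvScore_init (l : List Char) (init : Int) :
    pvScore l init = init * 5 ^ l.length + pvScore l 0 := by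
  induction l generalizing init with
  | nil => simp [pvScore]
  | cons c s ih =>
    simp only [pvScore, List.foldl] at *
    rw [ih ((init : Int) * 5 + pvVal c), ih ((0 : Int) * 5 + pvVal c)]
    simp only [List.length_cons, pow_succ]
    ring

theorem pvScore_cons (c : Char) (s : List Char) :
    pvScore (c :: s) 0 = pvVal c * 5 ^ s.length + pvScore s 0 := by
  have h := pvScore_init s ((0 : Int) * 5 + pvVal c)
  simp only [pvScore, List.foldl] at h ⊢
  rw [h]; ring

theorem go_eq_alt_go (cs : List Char) :
    ∀ stack, complete_row_go cs stack = complete_row_alt_go cs (pvTag stack) (pvScore stack 0) := by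
  induction cs with
  | nil => intro stack; simp [complete_row_go, complete_row_alt_go]
  | cons c rest ih =>
    intro stack
    simp only [complete_row_go, complete_row_alt_go]
    by_cases hc : pvIsOpen c = true
    · simp only [hc, if_pos]
      rw [ih (c :: stack)]
      have : pvScore (c :: stack) 0 = pvScore stack 0 + pvVal c * 5 ^ (pvTag stack).length := by
        rw [pvScore_cons, pvTag_length]; ring
      simp [pvTag, pvTag_length, this]
    · simp only [hc]
      cases stack with
      | nil => simp [pvTag]
      | cons t s =>
        simp only [pvTag]
        by_cases hm : pvMatch t c = true
        · simp only [hm, if_pos]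
          rw [ih s]
          have : pvScore (t :: s) 0 - pvVal t * 5 ^ s.length = pvScore s 0 := by
            rw [pvScore_cons]; ring
          simp [this]
        · simp [hm]

-- ===== VERDICT (by name: the statement is the Claim_ definition above) =====
theorem complete_row_spec : Claim_equal_complete_row := by
  intro a _ _
  unfold Spec_complete_row complete_row complete_row_alt
  simpa [pvTag, pvScore] using go_eq_alt_go a.toList []
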